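-- pv_equiv track=rewrite | github.com/Nitin2489/AgentForce_Nitin | src/agents/test_generator_agent.py | _extract_changes_summary
-- ===== SOURCE A (Python) =====
-- from typing import Dict, List, Any, Optional
--
-- def _extract_changes_summary(response: str) -> List[str]:
--     """Extract a summary of changes made during refinement"""
--     try:
--         # Look for sections that describe changes
--         lines = response.split('\n')
--         changes = []
--         in_changes_section = False
--
--         for line in lines:
--             if 'changes' in line.lower() or 'improvements' in line.lower():
--                 in_changes_section = True
--                 continue
--             elif in_changes_section and line.strip().startswith('-'):
--                 changes.append(line.strip())
--             elif in_changes_section and not line.strip():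
--                 break
--
--         return changes if changes else ["Tests refined based on user feedback"]
--     except Exception:
--         return ["Tests refined based on user feedback"]
-- ===== SOURCE B (Python) =====
-- from typing import List
--
-- _FALLBACK = ["Tests refined based on user feedback"]
--
--
-- def _is_trigger(line: str) -> bool:
--     low = line.lower()
--     return 'changes' in low or 'improvements' in low
--
--
-- def _extract_changes_summary(response: str) -> List[str]:
--     """Locate the first trigger line, cut the section at the first blank line
--     after it, and collect the dash lines from that slice."""
--     lines = response.split('\n')
--     idx = next((i for i, l in enumerate(lines) if _is_trigger(l)), None)
--     if idx is None:
--         return list(_FALLBACK)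
--     rest = lines[idx + 1:]
--     blank = next((j for j, l in enumerate(rest) if not l.strip()), len(rest))
--     changes = [l.strip() for l in rest[:blank]
--                if not _is_trigger(l) and l.strip().startswith('-')]
--     return changes or list(_FALLBACK)
-- ===== Notes on version B (the rewrite author's own statement) =====
-- stated objective: alternative
-- what changed: Replaces A's single stateful loop with break/continue and an in-section flag by a three-stage pipeline: find the index of the first trigger line, find the first blank line in the tail to cut the section, then one filter+map comprehension over that slice.
import Mathlib
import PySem

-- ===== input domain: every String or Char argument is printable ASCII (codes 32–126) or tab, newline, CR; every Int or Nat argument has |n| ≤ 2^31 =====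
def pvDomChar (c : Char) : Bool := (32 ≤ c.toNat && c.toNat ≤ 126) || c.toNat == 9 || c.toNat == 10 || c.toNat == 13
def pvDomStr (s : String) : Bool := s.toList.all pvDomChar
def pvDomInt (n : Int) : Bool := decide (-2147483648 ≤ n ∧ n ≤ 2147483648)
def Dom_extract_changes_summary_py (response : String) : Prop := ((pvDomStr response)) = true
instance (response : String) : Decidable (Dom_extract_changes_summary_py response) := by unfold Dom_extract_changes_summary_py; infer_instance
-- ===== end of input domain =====

-- B replaces A's stateful scan (flag + break/continue) by a find-index / cut-at-blank / filter pipeline; same cost ("alternative").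

-- ===== PORT A =====
-- `'changes' in line.lower() or 'improvements' in line.lower()`
def pvTrigA (line : String) : Bool :=
  PySem.Str.isIn "changes" (PySem.Str.lower line) || PySem.Str.isIn "improvements" (PySem.Str.lower line)

-- the `for line in lines` loop with state (changes, in_changes_section); `break` returns changes
def pvLoopA : List String → List String → Bool → List String
  | [], changes, _ => changes
  | line :: rest, changes, inSec =>
    if pvTrigA line then pvLoopA rest changes true
    else if inSec && PySem.Str.startswith (PySem.Str.strip line) "-" then
      pvLoopA rest (changes ++ [PySem.Str.strip line]) inSec
    else if inSec && (PySem.Str.strip line == "") then changes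
    else pvLoopA rest changes inSec

def extract_changes_summary_py (response : String) : List String :=
  let lines := (PySem.Str.split? response "\n").getD []
  let changes := pvLoopA lines [] false
  if changes = [] then ["Tests refined based on user feedback"] else changes

-- ===== PORT B =====
def pvFallback : List String := ["Tests refined based on user feedback"]

-- Source B's _is_trigger
def pvTrigB (line : String) : Bool :=
  let low := PySem.Str.lower line
  PySem.Str.isIn "changes" low || PySem.Str.isIn "improvements" low

def extract_changes_summary_py_alt (response : String) : List String :=
  let lines := (PySem.Str.split? response "\n").getD []
  match lines.findIdx? (fun l => pvTrigB l) with
  | none => pvFallback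
  | some i =>
    let rest := lines.drop (i + 1)
    let blank := (rest.findIdx? (fun l => PySem.Str.strip l == "")).getD rest.length
    let changes := ((rest.take blank).filter
        (fun l => !pvTrigB l && PySem.Str.startswith (PySem.Str.strip l) "-")).map PySem.Str.strip
    if changes = [] then pvFallback else changes

-- ===== PRECONDITION & SPEC =====
def Spec_extract_changes_summary_py (response : String) (out : List String) : Prop := out = extract_changes_summary_py_alt response
instance (response : String) (out : List String) : Decidable (Spec_extract_changes_summary_py response out) := by unfold Spec_extract_changes_summary_py; infer_instance

-- ===== CLAIM (what is proved, stated in full; the proofs are below) =====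
def Claim_equal_extract_changes_summary_py : Prop := ∀ (response : String), Dom_extract_changes_summary_py response → Spec_extract_changes_summary_py response (extract_changes_summary_py response)

-- ===== LEMMAS AND PROOFS =====

-- B's section collection, as a named function (syntactically B's expression)
def pvCollect (rest : List String) : List String :=
  ((rest.take ((rest.findIdx? (fun l => PySem.Str.strip l == "")).getD rest.length)).filter
      (fun l => !pvTrigB l && PySem.Str.startswith (PySem.Str.strip l) "-")).map PySem.Str.strip

theorem pvTrigAB (l : String) : pvTrigA l = pvTrigB l := rfl

theorem pvLowerChar_space (c : Char) (h : PySem.Chars.isspace c = true) :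
    PySem.Chars.lowerChar c = c := by
  have hu : PySem.Chars.isupper c = false := by
    simp only [PySem.Chars.isspace, PySem.Chars.isupper, Bool.or_eq_true, Bool.and_eq_true,
      decide_eq_true_eq, Bool.and_eq_false_iff, decide_eq_false_iff_not, Char.le_def,
      UInt32.le_iff_toNat_le] at h ⊢
    have h65 : ('A' : Char).val.toNat = 65 := by decide
    have h90 : ('Z' : Char).val.toNat = 90 := by decide
    rw [h65, h90]
    unfold Char.toNat at h
    omega
  simp [PySem.Chars.lowerChar, hu]

theorem pvStrip_nil_all_space {cs : List Char} (h : PySem.Chars.strip cs = []) :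
    ∀ c ∈ cs, PySem.Chars.isspace c = true := by
  intro c hc
  have hsplit := List.takeWhile_append_dropWhile (p := PySem.Chars.isspace) (l := cs)
  have hdrop : ∀ c ∈ List.dropWhile PySem.Chars.isspace cs, PySem.Chars.isspace c = true := by
    have h2 : List.dropWhile PySem.Chars.isspace
        (List.dropWhile PySem.Chars.isspace cs).reverse = [] := by
      have := h
      simp only [PySem.Chars.strip, PySem.Chars.lstrip, PySem.Chars.rstrip] at this
      simpa using this
    intro d hd
    have := (List.dropWhile_eq_nil_iff).mp h2
    exact this d (List.mem_reverse.mpr hd)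
  rw [← hsplit] at hc
  rcases List.mem_append.mp hc with h1 | h1
  · exact List.mem_takeWhile_imp h1
  · exact hdrop _ h1

-- a trigger line (contains 'changes'/'improvements' in lowercase) is never blank after strip
theorem pvTrig_not_blank (l : String) (h : pvTrigA l = true) :
    (PySem.Str.strip l == "") = false := by
  by_contra hne
  have hb : PySem.Str.strip l = "" := by
    cases hbe : (PySem.Str.strip l == "") with
    | false => exact absurd hbe hne
    | true => exact eq_of_beq hbe
  have hnil : PySem.Chars.strip l.toList = [] := by
    have := congrArg String.toList hb
    simpa [PySem.Str.strip] using this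
  have hall := pvStrip_nil_all_space hnil
  simp only [pvTrigA, Bool.or_eq_true, PySem.Str.isIn_iff_infix] at h
  have hmem : ∃ d ∈ l.toList, PySem.Chars.lowerChar d = 'c' ∨ PySem.Chars.lowerChar d = 'i' := by
    rcases h with h | h
    · have hc : 'c' ∈ (PySem.Str.lower l).toList := h.mem (by decide)
      rw [PySem.Str.toList_lower] at hc
      simp only [PySem.Chars.lower, List.mem_map] at hc
      obtain ⟨d, hd, hde⟩ := hc
      exact ⟨d, hd, Or.inl hde⟩
    · have hc : 'i' ∈ (PySem.Str.lower l).toList := h.mem (by decide)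
      rw [PySem.Str.toList_lower] at hc
      simp only [PySem.Chars.lower, List.mem_map] at hc
      obtain ⟨d, hd, hde⟩ := hc
      exact ⟨d, hd, Or.inr hde⟩
  obtain ⟨d, hd, hde⟩ := hmem
  have hsp := hall d hd
  rw [pvLowerChar_space d hsp] at hde
  rcases hde with rfl | rfl <;> simp [PySem.Chars.isspace] at hsp

-- a dash line is never blank after strip
theorem pvDash_not_blank (l : String) (h : PySem.Str.startswith (PySem.Str.strip l) "-" = true) :
    (PySem.Str.strip l == "") = false := by
  by_contra hne
  have hb : PySem.Str.strip l = "" := by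
    cases hbe : (PySem.Str.strip l == "") with
    | false => exact absurd hbe hne
    | true => exact eq_of_beq hbe
  rw [hb] at h
  simp [PySem.Str.startswith] at h
  exact absurd h (by decide)

theorem pvCollect_cons_of_not_blank (l : String) (rest : List String)
    (hb : (PySem.Str.strip l == "") = false) :
    pvCollect (l :: rest) =
      (if !pvTrigB l && PySem.Str.startswith (PySem.Str.strip l) "-" then
        [PySem.Str.strip l] else []) ++ pvCollect rest := by
  unfold pvCollect
  rw [List.findIdx?_cons]
  simp only [hb, Bool.false_eq_true, if_false]
  cases hf : rest.findIdx? (fun l => PySem.Str.strip l == "") with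
  | none =>
      simp only [Option.map_none, Option.getD_none, List.length_cons, List.take_succ_cons,
        List.filter_cons]
      cases hp : (!pvTrigB l && PySem.Str.startswith (PySem.Str.strip l) "-") <;> simp
  | some k =>
      simp only [Option.map_some, Option.getD_some, List.take_succ_cons, List.filter_cons]
      cases hp : (!pvTrigB l && PySem.Str.startswith (PySem.Str.strip l) "-") <;> simp

theorem pvCollect_cons_of_blank (l : String) (rest : List String)
    (hb : (PySem.Str.strip l == "") = true) :
    pvCollect (l :: rest) = [] := by
  unfold pvCollect
  rw [List.findIdx?_cons]
  simp [hb]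

theorem pvLoopA_sec (rest : List String) :
    ∀ changes, pvLoopA rest changes true = changes ++ pvCollect rest := by
  induction rest with
  | nil => intro changes; simp [pvLoopA, pvCollect]
  | cons l rest ih =>
    intro changes
    by_cases ht : pvTrigA l = true
    · rw [pvLoopA, if_pos ht, ih]
      rw [pvCollect_cons_of_not_blank l rest (pvTrig_not_blank l ht)]
      have hB : pvTrigB l = true := (pvTrigAB l) ▸ ht
      simp [hB]
    · have htf : pvTrigA l = false := by simpa using ht
      have hBf : pvTrigB l = false := (pvTrigAB l) ▸ htf
      by_cases hd : PySem.Str.startswith (PySem.Str.strip l) "-" = true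
      · have hd' : PySem.Chars.startswith (PySem.Chars.strip l.toList) ['-'] = true := by
          simpa using hd
        rw [pvLoopA, if_neg (by simp [htf]), if_pos (by simp [hd']), ih]
        rw [pvCollect_cons_of_not_blank l rest (pvDash_not_blank l hd)]
        simp [hBf, hd']
      · have hdf : PySem.Str.startswith (PySem.Str.strip l) "-" = false := by simpa using hd
        have hdf' : PySem.Chars.startswith (PySem.Chars.strip l.toList) ['-'] = false := by
          simpa using hdf
        by_cases hb : (PySem.Str.strip l == "") = true
        · rw [pvLoopA, if_neg (by simp [htf]), if_neg (by simp [hdf']), if_pos (by simp [hb])]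
          rw [pvCollect_cons_of_blank l rest hb]
          simp
        · have hbf : (PySem.Str.strip l == "") = false := by simpa using hb
          rw [pvLoopA, if_neg (by simp [htf]), if_neg (by simp [hdf']),
            if_neg (by simp [hbf]), ih]
          rw [pvCollect_cons_of_not_blank l rest hbf]
          simp [hdf']

theorem pvLoopA_pre (lines : List String) :
    pvLoopA lines [] false =
      match lines.findIdx? (fun l => pvTrigB l) with
      | none => []
      | some i => pvCollect (lines.drop (i + 1)) := by
  induction lines with
  | nil => simp [pvLoopA]
  | cons l rest ih =>
    by_cases ht : pvTrigA l = true
    · have hB : pvTrigB l = true := (pvTrigAB l) ▸ ht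
      rw [pvLoopA, if_pos ht, pvLoopA_sec]
      rw [List.findIdx?_cons]
      simp [hB]
    · have htf : pvTrigA l = false := by simpa using ht
      have hBf : pvTrigB l = false := (pvTrigAB l) ▸ htf
      rw [pvLoopA, if_neg (by simp [htf]), if_neg (by simp), if_neg (by simp), ih]
      rw [List.findIdx?_cons]
      simp only [hBf, Bool.false_eq_true, if_false]
      cases rest.findIdx? (fun l => pvTrigB l) <;> simp

-- ===== VERDICT (by name: the statement is the Claim_ definition above) =====
theorem extract_changes_summary_py_spec : Claim_equal_extract_changes_summary_py := by
  intro response _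
  show extract_changes_summary_py response = extract_changes_summary_py_alt response
  simp only [extract_changes_summary_py, extract_changes_summary_py_alt, pvLoopA_pre]
  cases hf : ((PySem.Str.split? response "\n").getD []).findIdx? (fun l => pvTrigB l) with
  | none => simp [pvFallback]
  | some i => simp [pvCollect, pvFallback]
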